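-- pv_equiv track=rewrite | github.com/Jair-Alvaro/PruebaTest | ejercicio1.py | contar_unicos_y_repetidos
-- ===== SOURCE A (Python) =====
-- def contar_unicos_y_repetidos(matriz):
--     """
--     Cuenta la cantidad de números que aparecen solo una vez y la cantidad de términos repetidos en una matriz nxn.
--
--     Args:
--     matriz (list of list of int): Una matriz nxn de enteros.
--
--     Returns:
--     list: Un arreglo cuyo primer elemento es la cantidad de números únicos y el segundo elemento es la cantidad de números repetidos.
--     """
--     # Diccionario para almacenar la frecuencia de cada número
--     frecuencia = {}
--
--     # Contar la frecuencia de cada número en la matriz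
--     for fila in matriz:
--         for numero in fila:
--             if numero in frecuencia:
--                 frecuencia[numero] += 1
--             else:
--                 frecuencia[numero] = 1
--
--     # Contar números únicos y repetidos
--     cantidad_unicos = 0
--     cantidad_repetidos = 0
--
--     for cantidad in frecuencia.values():
--         if cantidad == 1:
--             cantidad_unicos += 1
--         else:
--             cantidad_repetidos += 1
--
--     return [cantidad_unicos, cantidad_repetidos]
-- ===== SOURCE B (Python) =====
-- def contar_unicos_y_repetidos(matriz):
--     valores = sorted([v for fila in matriz for v in fila])
--     unicos = 0
--     repetidos = 0
--     i = 0
--     n = len(valores)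
--     while i < n:
--         j = i
--         while j < n and valores[j] == valores[i]:
--             j += 1
--         if j - i == 1:
--             unicos += 1
--         else:
--             repetidos += 1
--         i = j
--     return [unicos, repetidos]
-- ===== Notes on version B (the rewrite author's own statement) =====
-- stated objective: alternative
-- what changed: Replaces the frequency dictionary and the second pass over its values by flattening the matrix, sorting it once, and walking equal-value runs, classifying each run by its length.
import Mathlib
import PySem

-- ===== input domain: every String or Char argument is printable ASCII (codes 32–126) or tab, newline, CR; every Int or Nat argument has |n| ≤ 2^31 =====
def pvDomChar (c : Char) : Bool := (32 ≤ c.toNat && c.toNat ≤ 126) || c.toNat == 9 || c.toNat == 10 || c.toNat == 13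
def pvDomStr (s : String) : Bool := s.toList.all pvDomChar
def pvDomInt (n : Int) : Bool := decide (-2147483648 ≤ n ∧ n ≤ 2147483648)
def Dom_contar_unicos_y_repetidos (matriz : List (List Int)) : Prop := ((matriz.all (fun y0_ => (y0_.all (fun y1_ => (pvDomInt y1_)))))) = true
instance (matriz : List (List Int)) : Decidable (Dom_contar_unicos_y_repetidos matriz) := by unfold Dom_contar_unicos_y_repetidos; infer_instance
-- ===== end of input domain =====

-- B replaces A's frequency dictionary (built in a nested loop, then scanned) by a
-- single sorted flatten walked in equal-value runs; alternative decomposition, not faster.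

-- ===== PORT A =====
def contar_unicos_y_repetidos (matriz : List (List Int)) : List Int :=
  let frecuencia : PySem.Dict Int Int :=
    matriz.foldl (fun d fila =>
      fila.foldl (fun d numero =>
        if d.contains numero then d.modify numero 0 (· + 1)
        else d.insert numero 1) d) PySem.Dict.empty
  let res : Int × Int :=
    frecuencia.values.foldl (fun p cantidad =>
      if cantidad == 1 then (p.1 + 1, p.2) else (p.1, p.2 + 1)) (0, 0)
  [res.1, res.2]

-- ===== PORT B =====
-- the outer while loop of Source B: consume one equal-value run per step
def pvRunWalk : List Int → Int × Int
  | [] => (0, 0)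
  | x :: xs =>
      let run := 1 + (xs.takeWhile (· == x)).length
      let rest := xs.dropWhile (· == x)
      let p := pvRunWalk rest
      if run == 1 then (p.1 + 1, p.2) else (p.1, p.2 + 1)
  termination_by s => s.length
  decreasing_by
    simp only [List.length_cons]
    exact Nat.lt_succ_of_le (List.length_dropWhile_le _ _)

def contar_unicos_y_repetidos_alt (matriz : List (List Int)) : List Int :=
  let valores := PySem.List.sorted (matriz.flatMap (fun fila => fila)) (fun v => v) false
  let p := pvRunWalk valores
  [p.1, p.2]

-- ===== PRECONDITION & SPEC =====
def Spec_contar_unicos_y_repetidos (matriz : List (List Int)) (out : List Int) : Prop := out = contar_unicos_y_repetidos_alt matriz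
instance (matriz : List (List Int)) (out : List Int) : Decidable (Spec_contar_unicos_y_repetidos matriz out) := by unfold Spec_contar_unicos_y_repetidos; infer_instance

-- ===== CLAIM (what is proved, stated in full; the proofs are below) =====
def Claim_equal_contar_unicos_y_repetidos : Prop := ∀ (matriz : List (List Int)), Dom_contar_unicos_y_repetidos matriz → Spec_contar_unicos_y_repetidos matriz (contar_unicos_y_repetidos matriz)

-- ===== LEMMAS AND PROOFS =====

-- nodup lists with the same members have the same countP
theorem pv_countP_eq_of_nodup {l₁ l₂ : List Int} (h₁ : l₁.Nodup) (h₂ : l₂.Nodup)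
    (h : ∀ a, a ∈ l₁ ↔ a ∈ l₂) (p : Int → Bool) : l₁.countP p = l₂.countP p :=
  ((List.perm_ext_iff_of_nodup h₁ h₂).2 h).countP_eq p

-- A's branching update is Dict.modify
theorem pv_stepA_eq (d : PySem.Dict Int Int) (x : Int) :
    (if d.contains x then d.modify x 0 (· + 1) else d.insert x 1) = d.modify x 0 (· + 1) := by
  by_cases h : d.contains x = true
  · simp [h]
  · have h' : d.contains x = false := by simpa using h
    simp [PySem.Dict.modify, PySem.Dict.insert, PySem.Dict.getD,
      (PySem.Dict.get?_eq_none_iff_contains d x).2 h', h']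

-- the nested row fold is the fold over the flattened list
theorem pv_fold_flat (matriz : List (List Int)) (d : PySem.Dict Int Int) :
    matriz.foldl (fun d fila => fila.foldl (fun d x => d.modify x 0 (· + 1)) d) d
      = (matriz.flatMap (fun fila => fila)).foldl (fun d x => d.modify x 0 (· + 1)) d := by
  induction matriz generalizing d with
  | nil => rfl
  | cons f t ih => simp [List.flatMap_cons, List.foldl_append, ih]

-- A's second pass over a list of counts
theorem pv_foldCount (L : List Int) (u r : Int) :
    L.foldl (fun p c => if c == 1 then (p.1 + 1, p.2) else (p.1, p.2 + 1)) (u, r)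
      = (u + L.countP (fun c => c == 1), r + L.countP (fun c => !(c == 1))) := by
  induction L generalizing u r with
  | nil => simp
  | cons c t ih =>
    rw [List.foldl_cons]
    by_cases h : c = 1
    · rw [if_pos (by simp [h]), ih, List.countP_cons, List.countP_cons]
      simp [h, Prod.ext_iff]
      omega
    · rw [if_neg (by simp [h]), ih, List.countP_cons, List.countP_cons]
      simp [h, Prod.ext_iff]
      omega

-- B's run walk on a sorted list counts distinct values by their multiplicity
theorem pv_runWalk_sorted : ∀ (s : List Int), s.Pairwise (· ≤ ·) →
    pvRunWalk s = (((PySem.List.dedup s).countP (fun k => s.count k == 1) : Int),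
                   ((PySem.List.dedup s).countP (fun k => !(s.count k == 1)) : Int))
  | [], _ => by
      simp only [pvRunWalk]
      simp [PySem.List.dedup, PySem.Set.ofList]
  | x :: xs, hs => by
      have hrest_pw : (xs.dropWhile (· == x)).Pairwise (· ≤ ·) :=
        List.Pairwise.sublist (List.dropWhile_sublist _) (List.pairwise_cons.1 hs).2
      have ih := pv_runWalk_sorted (xs.dropWhile (· == x)) hrest_pw
      rw [pvRunWalk.eq_def]
      dsimp only
      set t := xs.takeWhile (· == x) with ht
      set r := xs.dropWhile (· == x) with hr
      have hsplit : t ++ r = xs := List.takeWhile_append_dropWhile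
      have hxs_le : ∀ y ∈ xs, x ≤ y := fun y hy => (List.pairwise_cons.1 hs).1 y hy
      have hx_not_rest : x ∉ r := by
        intro hmem
        cases hrc : r with
        | nil => simp [hrc] at hmem
        | cons h0 t0 =>
          have hh : (h0 == x) = false := by
            have := List.head?_dropWhile_not (· == x) xs
            rw [← hr, hrc] at this
            simpa using this
          have hxh : x ≤ h0 := hxs_le h0 (by rw [← hsplit, hrc]; simp)
          have hxh' : x < h0 := lt_of_le_of_ne hxh (by intro e; simp [← e] at hh)
          rw [hrc] at hmem
          rcases List.mem_cons.1 hmem with e | hmem'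
          · omega
          · have : h0 ≤ x := (List.pairwise_cons.1 (hrc ▸ hrest_pw)).1 x hmem'
            omega
      have htake_all : ∀ y ∈ t, y = x := by
        intro y hy
        have := List.mem_takeWhile_imp hy
        simpa using this
      have hcount_t : t.count x = t.length := by
        apply List.count_eq_length.2
        intro y hy
        exact (htake_all y hy).symm
      have hcount_rest_x : r.count x = 0 := List.count_eq_zero.2 hx_not_rest
      have hcount_x : (x :: xs).count x = 1 + t.length := by
        rw [List.count_cons_self, ← hsplit, List.count_append, hcount_t, hcount_rest_x]
        omega
      have hcount_y : ∀ y, y ≠ x → (x :: xs).count y = r.count y := by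
        intro y hy
        rw [List.count_cons_of_ne hy.symm, ← hsplit, List.count_append]
        have : t.count y = 0 := List.count_eq_zero.2 (fun hmem => hy (htake_all y hmem))
        omega
      have hded : ∀ p : Int → Bool,
          (PySem.List.dedup (x :: xs)).countP p = (x :: PySem.List.dedup r).countP p := by
        intro p
        apply pv_countP_eq_of_nodup (PySem.List.nodup_dedup _)
        · exact List.nodup_cons.2 ⟨fun h => hx_not_rest ((PySem.List.mem_dedup _ _).1 h),
            PySem.List.nodup_dedup _⟩
        · intro a
          rw [PySem.List.mem_dedup]
          simp only [List.mem_cons, PySem.List.mem_dedup]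
          constructor
          · rintro (e | ha)
            · exact Or.inl e
            · rw [← hsplit] at ha
              rcases List.mem_append.1 ha with h1 | h2
              · exact Or.inl (htake_all a h1)
              · exact Or.inr h2
          · rintro (e | ha)
            · exact Or.inl e
            · exact Or.inr (by rw [← hsplit]; exact List.mem_append.2 (Or.inr ha))
      have hcongr1 : (PySem.List.dedup r).countP (fun k => (x :: xs).count k == 1)
          = (PySem.List.dedup r).countP (fun k => r.count k == 1) := by
        apply List.countP_congr
        intro y hy
        have hyx : y ≠ x := fun e => hx_not_rest (e ▸ (PySem.List.mem_dedup _ _).1 hy)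
        rw [hcount_y y hyx]
      have hcongr2 : (PySem.List.dedup r).countP (fun k => !((x :: xs).count k == 1))
          = (PySem.List.dedup r).countP (fun k => !(r.count k == 1)) := by
        apply List.countP_congr
        intro y hy
        have hyx : y ≠ x := fun e => hx_not_rest (e ▸ (PySem.List.mem_dedup _ _).1 hy)
        rw [hcount_y y hyx]
      rw [ih, hded (fun k => (x :: xs).count k == 1), hded (fun k => !((x :: xs).count k == 1)),
        List.countP_cons, List.countP_cons, hcongr1, hcongr2]
      have hxs : xs.count x = t.length := by
        have hc := hcount_x
        rw [List.count_cons_self] at hc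
        omega
      by_cases h1 : t.length = 0
      · rw [if_pos (by simp [h1])]
        simp [hxs, h1]
      · rw [if_neg (by simp [h1])]
        simp [hxs, h1]
termination_by s => s.length
decreasing_by
  exact Nat.lt_succ_of_le (List.length_dropWhile_le _ _)

-- ===== VERDICT (by name: the statement is the Claim_ definition above) =====
theorem contar_unicos_y_repetidos_spec : Claim_equal_contar_unicos_y_repetidos := by
  intro matriz _
  unfold Spec_contar_unicos_y_repetidos contar_unicos_y_repetidos contar_unicos_y_repetidos_alt
  dsimp only
  set l := matriz.flatMap (fun fila => fila) with hl
  set s := PySem.List.sorted l (fun v => v) false with hs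
  have hdict : matriz.foldl (fun d fila =>
      fila.foldl (fun d numero =>
        if d.contains numero then d.modify numero 0 (· + 1)
        else d.insert numero 1) d) (PySem.Dict.empty : PySem.Dict Int Int) = PySem.Dict.counter l := by
    calc matriz.foldl (fun d fila =>
          fila.foldl (fun d numero =>
            if d.contains numero then d.modify numero 0 (· + 1)
            else d.insert numero 1) d) (PySem.Dict.empty : PySem.Dict Int Int)
        = matriz.foldl (fun d fila => fila.foldl (fun d x => d.modify x 0 (· + 1)) d)
            PySem.Dict.empty := by
          apply PySem.List.foldl_congr_mem
          intro d fila _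
          apply PySem.List.foldl_congr_mem
          intro d' x _
          exact pv_stepA_eq d' x
      _ = l.foldl (fun d x => d.modify x 0 (· + 1)) (PySem.Dict.empty : PySem.Dict Int Int) := pv_fold_flat matriz _
      _ = PySem.Dict.counter l := (PySem.Dict.counter_eq_foldl l).symm
  rw [hdict]
  have hvals : (PySem.Dict.counter l).values
      = (PySem.List.dedup l).map (fun k => (l.count k : Int)) := by
    show ((PySem.Dict.counter l).items).map (·.2) = _
    rw [PySem.Dict.items_counter, PySem.List.dedup_eq_ofList, List.map_map]
    rfl
  rw [hvals, pv_foldCount, List.countP_map, List.countP_map]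
  have hperm : s.Perm l := PySem.List.sorted_perm l _ false
  have hB := pv_runWalk_sorted s (by
    have := PySem.List.sorted_pairwise l (fun v => v)
    simpa using this)
  rw [hB]
  have hded : ∀ p : Int → Bool,
      (PySem.List.dedup s).countP p = (PySem.List.dedup l).countP p := by
    intro p
    apply pv_countP_eq_of_nodup (PySem.List.nodup_dedup _) (PySem.List.nodup_dedup _)
    intro a
    rw [PySem.List.mem_dedup, PySem.List.mem_dedup]
    exact hperm.mem_iff
  have hc1 : (PySem.List.dedup l).countP (fun k => s.count k == 1)
      = (PySem.List.dedup l).countP (fun k => l.count k == 1) := by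
    apply List.countP_congr
    intro y _
    rw [hperm.count_eq]
  have hc2 : (PySem.List.dedup l).countP (fun k => !(s.count k == 1))
      = (PySem.List.dedup l).countP (fun k => !(l.count k == 1)) := by
    apply List.countP_congr
    intro y _
    rw [hperm.count_eq]
  rw [hded (fun k => s.count k == 1), hded (fun k => !(s.count k == 1)), hc1, hc2]
  have hcast : (fun k : Int => ((l.count k : Int) == 1)) = (fun k => (l.count k == 1)) := by
    funext k
    by_cases h : l.count k = 1 <;> simp [h]
  have hcast2 : (fun k : Int => !((l.count k : Int) == 1)) = (fun k => !(l.count k == 1)) := by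
    funext k
    by_cases h : l.count k = 1 <;> simp [h]
  simp only [Function.comp_def, zero_add]
  rw [hcast, hcast2]
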